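-- pv_equiv track=rewrite | github.com/oliverflood/advent-of-code-2024 | day25a.py | conv_lock
-- ===== SOURCE A (Python) =====
-- def conv_lock(block):
-- 	ans = [0 for _ in range(len(block[0]))]
-- 	for c in range(len(ans)):
--
-- 		for r in range(len(block)):
-- 			if block[r][c] == '.':
-- 				ans[c] = r-1
-- 				break
--
-- 	return ans
-- ===== SOURCE B (Python) =====
-- def conv_lock(block):
--     pending = list(range(len(block[0])))
--     ans = [0] * len(pending)
--     for r, row in enumerate(block):
--         if not pending:
--             break
--         still = []
--         for c in pending:
--             if row[c] == '.':
--                 ans[c] = r - 1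
--             else:
--                 still.append(c)
--         pending = still
--     return ans
-- ===== Notes on version B (the rewrite author's own statement) =====
-- stated objective: alternative
-- what changed: Replaces A's per-column scan (outer loop over columns, inner loop over rows with break) by a single row-major pass that maintains a 'pending columns' list: each row resolves the pending columns showing '.', and the pass stops early once no column is pending.
import Mathlib
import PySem

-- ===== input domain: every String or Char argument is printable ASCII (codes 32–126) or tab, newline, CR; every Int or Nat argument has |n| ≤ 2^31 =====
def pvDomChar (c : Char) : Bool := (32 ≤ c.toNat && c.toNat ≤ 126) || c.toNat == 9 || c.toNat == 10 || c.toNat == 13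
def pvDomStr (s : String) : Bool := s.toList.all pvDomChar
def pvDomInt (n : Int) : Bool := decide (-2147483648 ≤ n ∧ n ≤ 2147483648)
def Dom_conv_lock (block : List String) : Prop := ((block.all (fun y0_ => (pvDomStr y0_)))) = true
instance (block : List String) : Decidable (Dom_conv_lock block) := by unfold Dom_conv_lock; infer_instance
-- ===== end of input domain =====

-- B replaces A's column-by-column scan with one row-major pass over a pending-columns list (alternative decomposition, same cost).

-- ===== PORT A =====
-- inner 'for r in range(len(block)): if block[r][c] == '.': ans[c] = r-1; break' — structural recursion over the rows,
-- r the running row index, acc the untouched initial ans[c] (= 0) returned when no '.' is found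
def pvAScan (rows : List String) (c : Nat) (r : Int) (acc : Int) : Int :=
  match rows with
  | [] => acc
  | row :: rest =>
    if PySem.Str.pyGet? row (c : Int) = some '.' then r - 1
    else pvAScan rest c (r + 1) acc

def conv_lock (block : List String) : List Int :=
  (List.range (block.headD "").length).map (fun c => pvAScan block c 0 0)

-- ===== PORT B =====
-- inner 'for c in pending: …' — returns (still, updated ans)
def pvBInner (pending : List Nat) (row : String) (r : Int) (ans : List Int) : List Nat × List Int :=
  match pending with
  | [] => ([], ans)
  | c :: cs =>
    if PySem.Str.pyGet? row (c : Int) = some '.' then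
      pvBInner cs row r (ans.set c (r - 1))
    else
      let p := pvBInner cs row r ans
      (c :: p.1, p.2)

-- outer 'for r, row in enumerate(block): if not pending: break; …'
def pvBOuter (rows : List String) (r : Int) (pending : List Nat) (ans : List Int) : List Int :=
  match rows with
  | [] => ans
  | row :: rest =>
    if pending = [] then ans
    else
      let p := pvBInner pending row r ans
      pvBOuter rest (r + 1) p.1 p.2

def conv_lock_alt (block : List String) : List Int :=
  let w := (block.headD "").length
  pvBOuter block 0 (List.range w) (List.replicate w (0 : Int))

-- ===== PRECONDITION & SPEC =====
-- Pre_ excludes exactly the inputs where the Python A raises: the empty block (block[0] → IndexError) and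
-- ragged blocks where some row is too short at a column before that column's first '.' (block[r][c] → IndexError).
def Pre_conv_lock (block : List String) : Prop :=
  block ≠ [] ∧ ∀ c < (block.headD "").length, ∀ i < block.length,
    ((block.getD i "").length ≤ c → ∃ j < i, PySem.Str.pyGet? (block.getD j "") (c : Int) = some '.')
instance (block : List String) : Decidable (Pre_conv_lock block) := by unfold Pre_conv_lock; infer_instance

def pvWitness_conv_lock : List String := ["#.", "##", ".#"]

def Spec_conv_lock (block : List String) (out : List Int) : Prop := out = conv_lock_alt block
instance (block : List String) (out : List Int) : Decidable (Spec_conv_lock block out) := by unfold Spec_conv_lock; infer_instance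

-- ===== CLAIM (what is proved, stated in full; the proofs are below) =====
def Claim_equal_conv_lock : Prop := ∀ (block : List String), Dom_conv_lock block → Pre_conv_lock block → Spec_conv_lock block (conv_lock block)

-- ===== LEMMAS AND PROOFS =====

def pvKeep (row : String) (c : Nat) : Bool := !(PySem.Str.pyGet? row ((c : Nat) : Int) == some '.')

theorem pvBInner_fst (cs : List Nat) (row : String) (r : Int) (ans : List Int) :
    (pvBInner cs row r ans).1 = cs.filter (pvKeep row) := by
  induction cs generalizing ans with
  | nil => rfl
  | cons c cs ih =>
    simp only [pvBInner, List.filter_cons]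
    by_cases h : PySem.Str.pyGet? row (c : Int) = some '.'
    · have hk : pvKeep row c = false := by rw [pvKeep, h]; decide
      rw [if_pos h, hk, ih]
      simp
    · have hk : pvKeep row c = true := by
        rw [pvKeep]
        simp only [Bool.not_eq_true', beq_eq_false_iff_ne, ne_eq]
        exact h
      rw [if_neg h, hk]
      show c :: (pvBInner cs row r ans).1 = _
      rw [ih]
      simp

theorem pvBInner_snd_get (cs : List Nat) (row : String) (r : Int) (ans : List Int) (i : Nat) :
    ((pvBInner cs row r ans).2)[i]? =
      if i ∈ cs ∧ PySem.Str.pyGet? row (i : Int) = some '.' then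
        (if i < ans.length then some (r - 1) else none)
      else ans[i]? := by
  induction cs generalizing ans with
  | nil => simp [pvBInner]
  | cons c cs ih =>
    simp only [pvBInner]
    by_cases h : PySem.Str.pyGet? row (c : Int) = some '.'
    · rw [if_pos h, ih, List.length_set]
      by_cases hmem : i ∈ cs ∧ PySem.Str.pyGet? row (i : Int) = some '.'
      · have hm' : i ∈ c :: cs ∧ PySem.Str.pyGet? row (i : Int) = some '.' :=
          ⟨List.mem_cons_of_mem _ hmem.1, hmem.2⟩
        rw [if_pos hmem, if_pos hm']
      · rw [if_neg hmem]
        by_cases hic : i = c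
        · subst hic
          have hm' : i ∈ i :: cs ∧ PySem.Str.pyGet? row (i : Int) = some '.' :=
            ⟨List.mem_cons_self, h⟩
          rw [if_pos hm', List.getElem?_set]
          simp
        · have hnc : ¬(i ∈ c :: cs ∧ PySem.Str.pyGet? row (i : Int) = some '.') := by
            intro ⟨h1, h2⟩
            rcases List.mem_cons.mp h1 with h1 | h1
            · exact hic h1
            · exact hmem ⟨h1, h2⟩
          rw [if_neg hnc, List.getElem?_set_ne (fun e => hic e.symm)]
    · rw [if_neg h]
      show ((pvBInner cs row r ans).2)[i]? = _
      rw [ih]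
      by_cases hmem : i ∈ cs ∧ PySem.Str.pyGet? row (i : Int) = some '.'
      · have hm' : i ∈ c :: cs ∧ PySem.Str.pyGet? row (i : Int) = some '.' :=
          ⟨List.mem_cons_of_mem _ hmem.1, hmem.2⟩
        rw [if_pos hmem, if_pos hm']
      · have hnc : ¬(i ∈ c :: cs ∧ PySem.Str.pyGet? row (i : Int) = some '.') := by
          intro ⟨h1, h2⟩
          rcases List.mem_cons.mp h1 with h1 | h1
          · exact h (h1 ▸ h2)
          · exact hmem ⟨h1, h2⟩
        rw [if_neg hmem, if_neg hnc]

theorem pvAScan_cons (row : String) (rest : List String) (c : Nat) (r acc : Int) :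
    pvAScan (row :: rest) c r acc =
      if PySem.Str.pyGet? row (c : Int) = some '.' then r - 1 else pvAScan rest c (r + 1) acc := rfl

theorem pvBOuter_get (rows : List String) (r : Int) (pending : List Nat) (ans : List Int) (i : Nat) :
    (pvBOuter rows r pending ans)[i]? =
      if i ∈ pending then (ans[i]?).map (fun a => pvAScan rows i r a) else ans[i]? := by
  induction rows generalizing r pending ans with
  | nil =>
    simp only [pvBOuter]
    by_cases h : i ∈ pending
    · rw [if_pos h]
      cases ans[i]? <;> rfl
    · rw [if_neg h]
  | cons row rest ih =>
    simp only [pvBOuter]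
    by_cases hp : pending = []
    · subst hp; simp
    · rw [if_neg hp]
      show (pvBOuter rest (r + 1) (pvBInner pending row r ans).1 (pvBInner pending row r ans).2)[i]? = _
      rw [ih, pvBInner_fst, pvBInner_snd_get]
      by_cases hmem : i ∈ pending
      · by_cases hdot : PySem.Str.pyGet? row (i : Int) = some '.'
        · have hk : pvKeep row i = false := by rw [pvKeep, hdot]; decide
          have hnf : i ∉ pending.filter (pvKeep row) := by
            intro hin
            have h2 := (List.mem_filter.mp hin).2
            rw [hk] at h2
            exact Bool.false_ne_true h2
          have hm : i ∈ pending ∧ PySem.Str.pyGet? row (i : Int) = some '.' := ⟨hmem, hdot⟩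
          rw [if_neg hnf, if_pos hm, if_pos hmem]
          cases hA : ans[i]? with
          | none =>
            have hlen : ans.length ≤ i := by
              by_contra hlt
              rw [List.getElem?_eq_getElem (by omega)] at hA
              exact Option.some_ne_none _ hA
            rw [if_neg (by omega)]
            rfl
          | some a =>
            obtain ⟨hlt, -⟩ := List.getElem?_eq_some_iff.mp hA
            rw [if_pos hlt]
            simp only [Option.map_some]
            rw [pvAScan_cons, if_pos hdot]
        · have hk : pvKeep row i = true := by
            rw [pvKeep]
            simp only [Bool.not_eq_true', beq_eq_false_iff_ne, ne_eq]
            exact hdot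
          have hf : i ∈ pending.filter (pvKeep row) := List.mem_filter.mpr ⟨hmem, hk⟩
          have hnd : ¬(i ∈ pending ∧ PySem.Str.pyGet? row (i : Int) = some '.') :=
            fun hh => hdot hh.2
          rw [if_pos hf, if_neg hnd, if_pos hmem]
          cases ans[i]? with
          | none => rfl
          | some a =>
            simp only [Option.map_some]
            rw [pvAScan_cons, if_neg hdot]
      · have hnf : i ∉ pending.filter (pvKeep row) :=
          fun hin => hmem (List.mem_filter.mp hin).1
        have hnd : ¬(i ∈ pending ∧ PySem.Str.pyGet? row (i : Int) = some '.') :=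
          fun hh => hmem hh.1
        rw [if_neg hnf, if_neg hnd, if_neg hmem]

theorem conv_lock_eq_alt (block : List String) : conv_lock block = conv_lock_alt block := by
  apply List.ext_getElem?
  intro i
  simp only [conv_lock, conv_lock_alt]
  rw [pvBOuter_get]
  generalize (block.headD "").length = w
  by_cases h : i < w
  · simp [h, List.mem_range]
  · have h1 : i ∉ List.range w := by simp [List.mem_range]; omega
    rw [List.getElem?_eq_none (by simpa using Nat.le_of_not_lt h),
        List.getElem?_eq_none (by simpa using Nat.le_of_not_lt h)]
    simp [h1]

-- ===== VERDICT (by name: the statement is the Claim_ definition above) =====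
theorem conv_lock_spec : Claim_equal_conv_lock := by
  intro block _ _
  show conv_lock block = conv_lock_alt block
  exact conv_lock_eq_alt block
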